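-- pv_equiv track=rewrite | github.com/fongradnastya/search_substrings | main.py | create_many_keys
-- ===== SOURCE A (Python) =====
-- from typing import Union
--
-- def create_many_keys(found: Union[dict, None]) -> list:
--     """
--     Создание массива индексов для нескольких ключей
--     :param found: индексы найденных ключевых слов
--     :return: массива индексов
--     """
--     ids = []
--     curr_id = -1
--     for key, value in found.items():
--         if value:
--             for i in range(len(value)):
--                 ids.append([])
--                 curr_id += 1
--                 for j in range(len(key)):
--                     ids[curr_id].append(value[i] + j)
--     return sorted(ids)
-- ===== SOURCE B (Python) =====
-- def create_many_keys(found):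
--     """
--     Создание массива индексов для нескольких ключей
--     :param found: индексы найденных ключевых слов
--     :return: массива индексов
--     """
--     blanks = 0
--     pairs = []
--     for key, value in found.items():
--         if not value:
--             continue
--         if key:
--             pairs.extend((start, len(key)) for start in value)
--         else:
--             # empty keyword: each occurrence contributes an empty range,
--             # and empty lists sort before every non-empty list
--             blanks += len(value)
--     pairs.sort()
--     return [[]] * blanks + [list(range(start, start + length))
--                             for start, length in pairs]
-- ===== Notes on version B (the rewrite author's own statement) =====
-- stated objective: alternative
-- what changed: Instead of materialising every occurrence as a full index list inside triple nested loops and sorting those lists, B collects compact (start, length) pairs (counting empty-keyword occurrences separately), sorts the pairs tuple-lexicographically, and only then expands each pair into its contiguous range; contiguous ranges compare exactly like their (start, length) pairs, with empty ranges first.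
import Mathlib
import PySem

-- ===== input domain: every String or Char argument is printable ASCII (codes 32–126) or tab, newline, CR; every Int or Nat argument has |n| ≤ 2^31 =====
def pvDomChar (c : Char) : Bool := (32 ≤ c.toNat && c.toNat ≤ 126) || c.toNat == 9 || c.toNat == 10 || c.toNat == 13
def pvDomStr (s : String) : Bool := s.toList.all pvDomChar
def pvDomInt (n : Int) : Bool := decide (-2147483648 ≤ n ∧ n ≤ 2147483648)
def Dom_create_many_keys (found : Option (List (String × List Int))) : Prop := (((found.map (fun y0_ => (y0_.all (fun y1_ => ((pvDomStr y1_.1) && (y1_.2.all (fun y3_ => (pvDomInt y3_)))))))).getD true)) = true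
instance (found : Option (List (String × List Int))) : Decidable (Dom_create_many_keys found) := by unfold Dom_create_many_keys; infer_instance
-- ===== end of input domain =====

-- B replaces A's triple nested loops (which materialise every occurrence as a full index
-- list and then sort those lists) by collecting compact (start, length) pairs, sorting
-- the pairs, and expanding each pair into its contiguous range afterwards; same result.

-- ===== PORT A =====
-- literal transliteration of A; 'ids.append([])' + per-element appends become
-- appending the completed row (the same list is built, in the same order)
def create_many_keys (found : Option (List (String × List Int))) : List (List Int) :=
  match found with
  | none => []   -- Python: None.items() raises AttributeError; excluded by Pre_
  | some l =>
    let ids := (PySem.Dict.ofList l).items.foldl (fun ids kv =>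
      if kv.2 ≠ [] then
        (PySem.List.pyRange 0 (PySem.List.len kv.2)).foldl (fun ids i =>
          ids ++ [(PySem.List.pyRange 0 (PySem.Str.len kv.1)).foldl
                    (fun row j => row ++ [PySem.List.pyGetD kv.2 i 0 + j]) []]) ids
      else ids) []
    PySem.List.sorted ids (fun x => x) false

-- ===== PORT B =====
def create_many_keys_alt (found : Option (List (String × List Int))) : List (List Int) :=
  match found with
  | none => []   -- Python: None.items() raises AttributeError; excluded by Pre_
  | some l =>
    let st := (PySem.Dict.ofList l).items.foldl
      (fun (st : Int × List (Int × Int)) kv =>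
        if kv.2 = [] then st
        else if kv.1 ≠ "" then
          (st.1, st.2 ++ kv.2.map (fun start => (start, PySem.Str.len kv.1)))
        else (st.1 + PySem.List.len kv.2, st.2))
      ((0 : Int), ([] : List (Int × Int)))
    PySem.List.pyRepeat [([] : List Int)] st.1 ++
      (PySem.List.sorted2 st.2 (fun p => p.1) (fun p => p.2) false).map
        (fun p => PySem.List.pyRange p.1 (p.1 + p.2))

-- ===== PRECONDITION & SPEC =====
-- Pre_ excludes only found = None, on which A raises AttributeError (B too).
def Pre_create_many_keys (found : Option (List (String × List Int))) : Prop :=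
  found ≠ none
instance (found : Option (List (String × List Int))) : Decidable (Pre_create_many_keys found) := by unfold Pre_create_many_keys; infer_instance
def pvWitness_create_many_keys : (Option (List (String × List Int))) :=
  some [("ab", [0, 3]), ("c", [1])]

def Spec_create_many_keys (found : Option (List (String × List Int))) (out : List (List Int)) : Prop := out = create_many_keys_alt found
instance (found : Option (List (String × List Int))) (out : List (List Int)) : Decidable (Spec_create_many_keys found out) := by unfold Spec_create_many_keys; infer_instance

-- ===== CLAIM (what is proved, stated in full; the proofs are below) =====
def Claim_equal_create_many_keys : Prop := ∀ (found : Option (List (String × List Int))), Dom_create_many_keys found → Pre_create_many_keys found → Spec_create_many_keys found (create_many_keys found)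

-- ===== LEMMAS AND PROOFS =====

-- range(0,L) shifted by v is range(v, v+L)
lemma pvShift (v L : Int) :
    (PySem.List.pyRange 0 L).map (fun j => v + j) = PySem.List.pyRange v (v + L) := by
  rw [PySem.List.pyRange_of_pos 0 L Int.one_pos, PySem.List.pyRange_of_pos v (v + L) Int.one_pos,
    List.map_map]
  have hn : (if (0:Int) < L then ((L - 0 + 1 - 1) / 1).toNat else 0)
      = (if v < v + L then ((v + L - v + 1 - 1) / 1).toNat else 0) := by
    split_ifs <;> omega
  rw [hn]
  refine List.map_congr_left fun k _ => ?_
  simp only [Function.comp]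
  ring

-- the contiguous range an occurrence expands to
def pvChunk (kv : String × List Int) : List (List Int) :=
  kv.2.map (fun s => PySem.List.pyRange s (s + PySem.Str.len kv.1))

-- A's unsorted ids list is the flat expansion of all occurrences
lemma pvA_ids (items : List (String × List Int)) (acc : List (List Int)) :
    items.foldl (fun ids kv =>
      if kv.2 ≠ [] then
        (PySem.List.pyRange 0 (PySem.List.len kv.2)).foldl (fun ids i =>
          ids ++ [(PySem.List.pyRange 0 (PySem.Str.len kv.1)).foldl
                    (fun row j => row ++ [PySem.List.pyGetD kv.2 i 0 + j]) []]) ids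
      else ids) acc
    = acc ++ items.flatMap pvChunk := by
  induction items generalizing acc with
  | nil => simp
  | cons kv rest ih =>
    rw [List.foldl_cons, ih]
    have hstep : (if kv.2 ≠ [] then
        (PySem.List.pyRange 0 (PySem.List.len kv.2)).foldl (fun ids i =>
          ids ++ [(PySem.List.pyRange 0 (PySem.Str.len kv.1)).foldl
                    (fun row j => row ++ [PySem.List.pyGetD kv.2 i 0 + j]) []]) acc
      else acc) = acc ++ pvChunk kv := by
      by_cases hv : kv.2 = []
      · simp [hv, pvChunk]
      · rw [if_pos hv, PySem.List.foldl_append_singleton_eq_map]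
        congr 1
        calc List.map (fun i => (PySem.List.pyRange 0 (PySem.Str.len kv.1)).foldl
                (fun row j => row ++ [PySem.List.pyGetD kv.2 i 0 + j]) [])
                (PySem.List.pyRange 0 (PySem.List.len kv.2))
            = List.map ((fun s => PySem.List.pyRange s (s + PySem.Str.len kv.1)) ∘
                (fun i => PySem.List.pyGetD kv.2 i 0)) (PySem.List.pyRange 0 (PySem.List.len kv.2)) := by
              refine List.map_congr_left fun i _ => ?_
              simp only [Function.comp]
              rw [PySem.List.foldl_append_singleton_eq_map, List.nil_append, pvShift]
          _ = pvChunk kv := by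
              rw [← List.map_map, PySem.List.map_pyGetD_pyRange_zero]
              rfl
    rw [hstep, List.append_assoc, List.flatMap_cons]

-- B's accumulated state, closed form
def pvPairs (items : List (String × List Int)) : List (Int × Int) :=
  items.flatMap (fun kv =>
    if kv.1 ≠ "" then kv.2.map (fun s => (s, PySem.Str.len kv.1)) else [])

def pvBlanks (items : List (String × List Int)) : Nat :=
  ((items.filter (fun kv => kv.1 = "")).map (fun kv => kv.2.length)).sum

lemma pvB_state (items : List (String × List Int)) (st : Int × List (Int × Int)) :
    items.foldl
      (fun (st : Int × List (Int × Int)) kv =>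
        if kv.2 = [] then st
        else if kv.1 ≠ "" then
          (st.1, st.2 ++ kv.2.map (fun start => (start, PySem.Str.len kv.1)))
        else (st.1 + PySem.List.len kv.2, st.2)) st
    = (st.1 + (pvBlanks items : Int), st.2 ++ pvPairs items) := by
  induction items generalizing st with
  | nil => simp [pvBlanks, pvPairs]
  | cons kv rest ih =>
    rw [List.foldl_cons, ih]
    by_cases hv : kv.2 = [] <;> by_cases hk : kv.1 = "" <;>
      simp [hv, hk, pvBlanks, pvPairs, PySem.List.len, Prod.ext_iff] <;>
      omega

-- insertion with a strict-comparison test keeps the list pairwise-ordered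
lemma pvInsertBy_pairwise {α : Type} (before : α → α → Bool)
    (hasym : ∀ a b, before a b = true → before b a = false)
    (htrans : ∀ a b c, before b a = false → before c b = false → before c a = false)
    (x : α) (ys : List α) (h : ys.Pairwise (fun a b => before b a = false)) :
    (PySem.List.insertBy before x ys).Pairwise (fun a b => before b a = false) := by
  induction ys with
  | nil => simp [PySem.List.insertBy]
  | cons y ys ih =>
    rcases List.pairwise_cons.mp h with ⟨hy, hys⟩
    by_cases hb : before x y = true
    · rw [show PySem.List.insertBy before x (y :: ys) = x :: y :: ys from by
        simp [PySem.List.insertBy, hb]]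
      refine List.pairwise_cons.mpr ⟨?_, h⟩
      intro z hz
      rcases List.mem_cons.mp hz with rfl | hz'
      · exact hasym x z hb
      · exact htrans x y z (hasym x y hb) (hy z hz')
    · rw [show PySem.List.insertBy before x (y :: ys) = y :: PySem.List.insertBy before x ys from by
        simp [PySem.List.insertBy, hb]]
      refine List.pairwise_cons.mpr ⟨?_, ih hys⟩
      intro z hz
      rcases (PySem.List.mem_insertBy before x z ys).mp hz with rfl | hz'
      · exact eq_false_of_ne_true hb
      · exact hy z hz'

lemma pvFoldl_insertBy_pairwise {α : Type} (before : α → α → Bool)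
    (hasym : ∀ a b, before a b = true → before b a = false)
    (htrans : ∀ a b c, before b a = false → before c b = false → before c a = false)
    (xs : List α) (acc : List α) (h : acc.Pairwise (fun a b => before b a = false)) :
    (xs.foldl (fun acc x => PySem.List.insertBy before x acc) acc).Pairwise
      (fun a b => before b a = false) := by
  induction xs generalizing acc with
  | nil => exact h
  | cons x xs ih => exact ih _ (pvInsertBy_pairwise before hasym htrans x acc h)

-- the pairwise order sorted2 establishes (lexicographic ≤ on the two keys)
lemma pvSorted2_pairwise {α : Type} (xs : List α) (k1 k2 : α → Int) :
    (PySem.List.sorted2 xs k1 k2 false).Pairwise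
      (fun a b => k1 a < k1 b ∨ (k1 a = k1 b ∧ k2 a ≤ k2 b)) := by
  have hres := pvFoldl_insertBy_pairwise
    (fun a b => decide (k1 a < k1 b) || (!decide (k1 b < k1 a) && decide (k2 a < k2 b)))
    (by intro a b hab; simp at hab ⊢; omega)
    (by intro a b c hba hcb; simp at hba hcb ⊢; omega)
    xs [] (List.Pairwise.nil)
  refine List.Pairwise.imp ?_ hres
  intro a b hab
  simp at hab
  omega

-- List.range m is a prefix of List.range n for m ≤ n
lemma pvRange_prefix {m n : Nat} (h : m ≤ n) : List.range m <+: List.range n := by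
  have ht := List.take_prefix m (List.range n)
  rwa [List.take_range, Nat.min_eq_left h] at ht

lemma pvLex_append (l : List Int) (x : Int) (t : List Int) :
    List.Lex (fun a b => a < b) l (l ++ x :: t) := by
  induction l with
  | nil => exact List.Lex.nil
  | cons a l' ih => exact List.Lex.cons ih

lemma pvPrefix_le (l m : List Int) (h : l <+: m) : l ≤ m := by
  obtain ⟨t, rfl⟩ := h
  cases t with
  | nil => simp
  | cons x t' => exact le_of_lt (pvLex_append l x t')

lemma pvNil_le (b : List Int) : ([] : List Int) ≤ b := pvPrefix_le [] b List.nil_prefix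

-- the two list-order instances give the same sorted list (the comparisons decide the same propositions)
lemma pvSorted_inst (xs : List (List Int)) :
    PySem.List.sorted xs (fun x => x) false
      = @PySem.List.sorted (List Int) (List Int) List.instLinearOrder.toLT
          LinearOrder.toDecidableLT xs (fun x => x) false := by
  rw [PySem.List.sorted_eq_foldl_insertBy,
    @PySem.List.sorted_eq_foldl_insertBy (List Int) (List Int) List.instLinearOrder.toLT
      LinearOrder.toDecidableLT xs (fun x => x)]
  congr 1
  funext acc x
  congr 1
  funext a b
  exact decide_eq_decide.mpr Iff.rfl

-- expanding is monotone: pair-lexicographic order gives list-lexicographic order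
lemma pvExpand_mono (p q : Int × Int) (hp : 1 ≤ p.2) (hq : 1 ≤ q.2)
    (h : p.1 < q.1 ∨ (p.1 = q.1 ∧ p.2 ≤ q.2)) :
    PySem.List.pyRange p.1 (p.1 + p.2) ≤ PySem.List.pyRange q.1 (q.1 + q.2) := by
  rcases h with hlt | ⟨heq, hle⟩
  · have e1 : PySem.List.pyRange p.1 (p.1 + p.2)
        = p.1 :: PySem.List.pyRange (p.1 + 1) (p.1 + p.2) :=
      PySem.List.pyRange_one_cons (by omega)
    have e2 : PySem.List.pyRange q.1 (q.1 + q.2)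
        = q.1 :: PySem.List.pyRange (q.1 + 1) (q.1 + q.2) :=
      PySem.List.pyRange_one_cons (by omega)
    rw [e1, e2]
    exact le_of_lt (List.Lex.rel hlt)
  · refine pvPrefix_le _ _ ?_
    rw [heq, PySem.List.pyRange_of_pos q.1 (q.1 + p.2) Int.one_pos,
      PySem.List.pyRange_of_pos q.1 (q.1 + q.2) Int.one_pos]
    refine List.IsPrefix.map _ (pvRange_prefix ?_)
    split_ifs <;> omega

-- every pair B collects has length ≥ 1
lemma pvPairs_len (items : List (String × List Int)) :
    ∀ p ∈ pvPairs items, 1 ≤ p.2 := by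
  intro p hp
  simp only [pvPairs, List.mem_flatMap] at hp
  rcases hp with ⟨kv, _, hmem⟩
  by_cases hk : kv.1 = ""
  · simp [hk] at hmem
  · rw [if_pos hk, List.mem_map] at hmem
    rcases hmem with ⟨s, _, rfl⟩
    have hne : kv.1.toList ≠ [] := by simpa using hk
    rw [PySem.Str.len_eq]
    have := List.length_pos_of_ne_nil hne
    omega

-- empty-key chunks are lists of empty index lists
lemma pvChunk_empty_key (kv : String × List Int) (hk : kv.1 = "") :
    pvChunk kv = List.replicate kv.2.length ([] : List Int) := by
  have hr : ∀ s : Int, PySem.List.pyRange s (s + PySem.Str.len kv.1) = [] := by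
    intro s
    rw [hk, show PySem.Str.len "" = 0 from rfl,
      PySem.List.pyRange_of_pos s (s + 0) Int.one_pos]
    simp
  simp only [pvChunk]
  rw [List.map_congr_left (fun s _ => hr s)]
  simp [List.map_const']

-- the whole right-hand side is a permutation of A's unsorted ids
lemma pvPerm (items : List (String × List Int)) :
    (List.replicate (pvBlanks items) ([] : List Int) ++
      (PySem.List.sorted2 (pvPairs items) (fun p => p.1) (fun p => p.2) false).map
        (fun p => PySem.List.pyRange p.1 (p.1 + p.2))).Perm
      (items.flatMap pvChunk) := by
  have hsplit : ∀ kv : String × List Int, pvChunk kv =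
      (if kv.1 = "" then pvChunk kv else []) ++ (if kv.1 ≠ "" then pvChunk kv else []) := by
    intro kv; by_cases hk : kv.1 = "" <;> simp [hk]
  have he : items.flatMap (fun kv => if kv.1 = "" then pvChunk kv else [])
      = List.replicate (pvBlanks items) ([] : List Int) := by
    induction items with
    | nil => simp [pvBlanks]
    | cons kv rest ih =>
      rw [List.flatMap_cons, ih]
      by_cases hk : kv.1 = ""
      · rw [if_pos hk, pvChunk_empty_key kv hk]
        have hb : pvBlanks (kv :: rest) = kv.2.length + pvBlanks rest := by
          simp [pvBlanks, hk]
        rw [hb, List.replicate_add]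
      · rw [if_neg hk]
        simp [pvBlanks, hk]
  have hn : (pvPairs items).map (fun p => PySem.List.pyRange p.1 (p.1 + p.2))
      = items.flatMap (fun kv => if kv.1 ≠ "" then pvChunk kv else []) := by
    rw [pvPairs, List.map_flatMap]
    congr 1
    funext kv
    by_cases hk : kv.1 = ""
    · simp [hk]
    · simp only [if_pos (show kv.1 ≠ "" from hk), List.map_map]
      rfl
  have hperm1 : ((PySem.List.sorted2 (pvPairs items) (fun p => p.1) (fun p => p.2) false).map
        (fun p => PySem.List.pyRange p.1 (p.1 + p.2))).Perm
      ((pvPairs items).map (fun p => PySem.List.pyRange p.1 (p.1 + p.2))) :=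
    (PySem.List.sorted2_perm (pvPairs items) (fun p => p.1) (fun p => p.2) false).map _
  refine ((List.Perm.refl _).append hperm1).trans ?_
  rw [hn, ← he]
  refine (List.flatMap_append_perm items _ _).trans ?_
  rw [show (fun kv => (if kv.1 = "" then pvChunk kv else []) ++
      (if kv.1 ≠ "" then pvChunk kv else [])) = pvChunk from (funext fun kv => (hsplit kv).symm)]

-- the whole right-hand side is pairwise ≤
lemma pvPairwise (items : List (String × List Int)) :
    (List.replicate (pvBlanks items) ([] : List Int) ++
      (PySem.List.sorted2 (pvPairs items) (fun p => p.1) (fun p => p.2) false).map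
        (fun p => PySem.List.pyRange p.1 (p.1 + p.2))).Pairwise (· ≤ ·) := by
  rw [List.pairwise_append]
  refine ⟨List.pairwise_replicate_of_refl, ?_, ?_⟩
  · rw [List.pairwise_map]
    refine List.Pairwise.imp_of_mem ?_
      (pvSorted2_pairwise (pvPairs items) (fun p => p.1) (fun p => p.2))
    intro a b ha hb hab
    have hma : a ∈ pvPairs items :=
      ((PySem.List.sorted2_perm (pvPairs items) _ _ false).mem_iff).mp ha
    have hmb : b ∈ pvPairs items :=
      ((PySem.List.sorted2_perm (pvPairs items) _ _ false).mem_iff).mp hb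
    exact pvExpand_mono a b (pvPairs_len items a hma) (pvPairs_len items b hmb) hab
  · intro a ha b hb
    rw [List.eq_of_mem_replicate ha]
    exact pvNil_le b

lemma pvMain (l : List (String × List Int)) :
    create_many_keys (some l) = create_many_keys_alt (some l) := by
  have h1 : create_many_keys (some l) =
      PySem.List.sorted ((PySem.Dict.ofList l).items.foldl (fun ids kv =>
        if kv.2 ≠ [] then
          (PySem.List.pyRange 0 (PySem.List.len kv.2)).foldl (fun ids i =>
            ids ++ [(PySem.List.pyRange 0 (PySem.Str.len kv.1)).foldl
                      (fun row j => row ++ [PySem.List.pyGetD kv.2 i 0 + j]) []]) ids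
        else ids) []) (fun x => x) false := rfl
  have h2 : create_many_keys_alt (some l) =
      PySem.List.pyRepeat [([] : List Int)]
        ((PySem.Dict.ofList l).items.foldl
          (fun (st : Int × List (Int × Int)) kv =>
            if kv.2 = [] then st
            else if kv.1 ≠ "" then
              (st.1, st.2 ++ kv.2.map (fun start => (start, PySem.Str.len kv.1)))
            else (st.1 + PySem.List.len kv.2, st.2))
          ((0 : Int), ([] : List (Int × Int)))).1 ++
      (PySem.List.sorted2
        ((PySem.Dict.ofList l).items.foldl
          (fun (st : Int × List (Int × Int)) kv =>
            if kv.2 = [] then st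
            else if kv.1 ≠ "" then
              (st.1, st.2 ++ kv.2.map (fun start => (start, PySem.Str.len kv.1)))
            else (st.1 + PySem.List.len kv.2, st.2))
          ((0 : Int), ([] : List (Int × Int)))).2 (fun p => p.1) (fun p => p.2) false).map
        (fun p => PySem.List.pyRange p.1 (p.1 + p.2)) := rfl
  rw [h1, h2, pvA_ids ((PySem.Dict.ofList l).items) [], List.nil_append,
    pvB_state ((PySem.Dict.ofList l).items) ((0 : Int), ([] : List (Int × Int)))]
  simp only [zero_add, List.nil_append]
  rw [PySem.List.pyRepeat_singleton, Int.toNat_natCast, pvSorted_inst]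
  exact PySem.List.sorted_id_eq_of_perm_of_pairwise _ _ (pvPerm _) (pvPairwise _)

-- ===== VERDICT (by name: the statement is the Claim_ definition above) =====
theorem create_many_keys_spec : Claim_equal_create_many_keys := by
  intro found _ hpre
  unfold Spec_create_many_keys
  unfold Pre_create_many_keys at hpre
  match found with
  | none => exact absurd rfl hpre
  | some l => exact pvMain l
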